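-- pv_equiv track=rewrite | github.com/tjcdev/leetcode | arrays/meta_level2_hops.py | getSecondsRequired
-- ===== SOURCE A (Python) =====
-- from typing import List
--
-- def getSecondsRequired(N: int, F: int, P: List[int]) -> int:
--   # Write your code here
--   sorted_F = sorted(P)
--
--   ans = 0
--   for i in range(len(sorted_F)-1):
--     ans += (sorted_F[i+1] - sorted_F[i])-1
--
--   ans += N - sorted_F[-1]
--
--   ans += F-1
--
--   return ans
-- ===== SOURCE B (Python) =====
-- # The telescoping sum over the sorted list collapses: answer = N - min(P) + F - len(P).
-- def getSecondsRequired(N, F, P):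
--     return N - min(P) + F - len(P)
-- ===== Notes on version B (the rewrite author's own statement) =====
-- stated objective: faster
-- what changed: Replaced sort + telescoping gap loop by the closed form N - min(P) + F - len(P) computed with a single min pass.
import Mathlib
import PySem

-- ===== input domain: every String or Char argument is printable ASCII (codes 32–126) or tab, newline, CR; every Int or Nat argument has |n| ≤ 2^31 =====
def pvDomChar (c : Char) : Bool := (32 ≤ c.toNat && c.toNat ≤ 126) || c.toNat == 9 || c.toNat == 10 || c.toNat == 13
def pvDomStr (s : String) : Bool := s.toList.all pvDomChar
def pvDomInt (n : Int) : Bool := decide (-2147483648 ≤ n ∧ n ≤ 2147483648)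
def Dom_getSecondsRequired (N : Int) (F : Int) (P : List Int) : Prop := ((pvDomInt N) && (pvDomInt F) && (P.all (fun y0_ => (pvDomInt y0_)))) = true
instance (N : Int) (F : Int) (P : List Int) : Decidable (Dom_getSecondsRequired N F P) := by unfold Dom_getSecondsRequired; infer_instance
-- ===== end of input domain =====

-- B replaces A's sort + telescoping gap loop by the closed form N - min(P) + F - len(P) (faster).
-- ===== PORT A =====
def getSecondsRequired (N : Int) (F : Int) (P : List Int) : Int :=
  let sortedF := PySem.List.sorted P (fun x => x) false
  let ans : Int :=
    (PySem.List.pyRange 0 ((sortedF.length : Int) - 1) 1).foldl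
      (fun ans i =>
        ans + (PySem.List.pyGetD sortedF (i + 1) 0 - PySem.List.pyGetD sortedF i 0) - 1) 0
  let ans := ans + (N - PySem.List.pyGetD sortedF (-1) 0)
  let ans := ans + (F - 1)
  ans

-- ===== PORT B =====
def getSecondsRequired_alt (N : Int) (F : Int) (P : List Int) : Int :=
  N - (PySem.List.min? P (fun x => x)).getD 0 + F - (P.length : Int)

-- ===== PRECONDITION & SPEC =====
-- Pre_ excludes P = [], on which A raises IndexError (sorted_F[-1]).
def Pre_getSecondsRequired (N : Int) (F : Int) (P : List Int) : Prop := P ≠ []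
instance (N : Int) (F : Int) (P : List Int) : Decidable (Pre_getSecondsRequired N F P) := by unfold Pre_getSecondsRequired; infer_instance
def pvWitness_getSecondsRequired : Int × Int × List Int := (6, 2, [4, 1])
def Spec_getSecondsRequired (N : Int) (F : Int) (P : List Int) (out : Int) : Prop := out = getSecondsRequired_alt N F P
instance (N : Int) (F : Int) (P : List Int) (out : Int) : Decidable (Spec_getSecondsRequired N F P out) := by unfold Spec_getSecondsRequired; infer_instance

-- ===== CLAIM (what is proved, stated in full; the proofs are below) =====
def Claim_equal_getSecondsRequired : Prop := ∀ (N : Int) (F : Int) (P : List Int), Dom_getSecondsRequired N F P → Pre_getSecondsRequired N F P → Spec_getSecondsRequired N F P (getSecondsRequired N F P)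

-- ===== LEMMAS AND PROOFS =====

-- Telescoping: the gap loop over adjacent pairs collapses to last - head - (len - 1).
theorem tele_foldl (s : List Int) (hs : s ≠ []) (init : Int) :
    (List.range (s.length - 1)).foldl
      (fun ans k => ans + (s.getD (k + 1) 0 - s.getD k 0) - 1) init
      = init + s.getLast?.getD 0 - s.head?.getD 0 - ((s.length : Int) - 1) := by
  induction s generalizing init with
  | nil => exact absurd rfl hs
  | cons a t ih =>
    cases t with
    | nil => simp
    | cons b u =>
      have hne : (b :: u) ≠ [] := by simp
      have hlen : (a :: b :: u).length - 1 = ((b :: u).length - 1) + 1 := by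
        simp [List.length_cons]
      rw [hlen, List.range_succ_eq_map, List.foldl_cons, List.foldl_map]
      have hfun : ∀ (acc : Int) (k : Nat),
          acc + ((a :: b :: u).getD (k.succ + 1) 0 - (a :: b :: u).getD k.succ 0) - 1
            = acc + ((b :: u).getD (k + 1) 0 - (b :: u).getD k 0) - 1 := by
        intro acc k; simp [List.getD]
      have : ((b :: u).length - 1) = (List.range ((b :: u).length - 1)).length := by simp
      rw [PySem.List.foldl_congr_mem _ _ _ _ (by intro acc k _; exact hfun acc k)]
      rw [ih hne]
      simp [List.getD, List.getLast?_cons_cons]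
      ring
  
theorem min_eq_head_sorted (P : List Int) (hP : P ≠ []) :
    (PySem.List.min? P (fun x => x)).getD 0
      = (PySem.List.sorted P (fun x => x) false).head?.getD 0 := by
  have hsne : PySem.List.sorted P (fun x => x) false ≠ [] := by
    simpa [PySem.List.sorted_eq_nil_iff] using hP
  obtain ⟨h, t, hs⟩ := List.exists_cons_of_ne_nil hsne
  obtain ⟨m, hm⟩ : ∃ m, PySem.List.min? P (fun x => x) = some m := by
    cases hmin : PySem.List.min? P (fun x => x) with
    | none => exact absurd ((PySem.List.min?_eq_none_iff _ _).1 hmin) hP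
    | some m => exact ⟨m, rfl⟩
  have hmP : m ∈ P := PySem.List.min?_mem hm
  have hmin : ∀ y ∈ P, m ≤ y := PySem.List.min?_isMin hm
  have hhle : ∀ y ∈ P, h ≤ y := PySem.List.key_head_sorted_le P (fun x => x) hs
  have hhP : h ∈ P := by
    have : h ∈ PySem.List.sorted P (fun x => x) false := by rw [hs]; exact List.mem_cons_self
    exact (PySem.List.mem_sorted _ _ _ _).1 this
  have h1 := hmin h hhP
  have h2 := hhle m hmP
  have : m = h := le_antisymm h1 h2
  simp [hm, hs, this]

-- ===== VERDICT (by name: the statement is the Claim_ definition above) =====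
theorem getSecondsRequired_spec : Claim_equal_getSecondsRequired := by
  intro N F P _ hP
  unfold Spec_getSecondsRequired getSecondsRequired getSecondsRequired_alt
  have hsne : PySem.List.sorted P (fun x => x) false ≠ [] := by
    simpa [PySem.List.sorted_eq_nil_iff] using hP
  set s := PySem.List.sorted P (fun x => x) false with hsdef
  have hlen : s.length = P.length := PySem.List.length_sorted ..
  have hfold :
      (PySem.List.pyRange 0 ((s.length : Int) - 1) 1).foldl
        (fun ans i => ans + (PySem.List.pyGetD s (i + 1) 0 - PySem.List.pyGetD s i 0) - 1) 0
        = (List.range (s.length - 1)).foldl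
            (fun ans k => ans + (s.getD (k + 1) 0 - s.getD k 0) - 1) 0 := by
    rw [PySem.List.pyRange_one, List.foldl_map]
    have hcast : (((s.length : Int) - 1 - 0).toNat) = s.length - 1 := by omega
    rw [hcast]
    apply PySem.List.foldl_congr_mem
    intro acc k _
    have e1 : PySem.List.pyGetD s ((0 : Int) + k + 1) 0 = s.getD (k + 1) 0 := by
      have : ((0 : Int) + k + 1) = ((k + 1 : Nat) : Int) := by push_cast; ring
      rw [this, PySem.List.pyGetD_natCast]
    have e2 : PySem.List.pyGetD s ((0 : Int) + k) 0 = s.getD k 0 := by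
      have : ((0 : Int) + k) = ((k : Nat) : Int) := by push_cast; ring
      rw [this, PySem.List.pyGetD_natCast]
    rw [e1, e2]
  have hneg : PySem.List.pyGetD s (-1) 0 = s.getLast?.getD 0 := by
    rw [PySem.List.pyGetD_neg_one s 0 hsne, List.getLast?_eq_some_getLast hsne]
    rfl
  simp only [hfold]
  rw [tele_foldl s hsne 0, hneg, min_eq_head_sorted P hP, ← hsdef, hlen]
  ring
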